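-- pv_equiv track=rewrite | github.com/hulu-1/popai2api | python/main.py | map_model_name
-- ===== SOURCE A (Python) =====
-- def map_model_name(model_name):
--     model_mapping = {
--         "gpt-4": "GPT-4",
--         "dalle3": "GPT-4",
--         "dalle-3": "GPT-4",
--         "dall-e-3": "GPT-4",
--         "gpt-3.5": "Standard",
--         "websearch": "Web Search",
--         "internet": "Web Search",
--         "gpt-4o": "GPT-4o"
--     }
--     sorted_keys = sorted(model_mapping.keys(), key=len, reverse=True)
--     for key in sorted_keys:
--         if model_name.lower().startswith(key):
--             return model_mapping[key]
--     return "GPT-4"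
-- ===== SOURCE B (Python) =====
-- def map_model_name(model_name):
--     model_mapping = {
--         "gpt-4": "GPT-4",
--         "dalle3": "GPT-4",
--         "dalle-3": "GPT-4",
--         "dall-e-3": "GPT-4",
--         "gpt-3.5": "Standard",
--         "websearch": "Web Search",
--         "internet": "Web Search",
--         "gpt-4o": "GPT-4o"
--     }
--     lowered = model_name.lower()
--     best_len = -1
--     result = "GPT-4"
--     for key, val in model_mapping.items():
--         if len(key) > best_len and lowered.startswith(key):
--             best_len = len(key)
--             result = val
--     return result
-- ===== Notes on version B (the rewrite author's own statement) =====
-- stated objective: simpler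
-- what changed: Replaced the sort-by-length pre-pass plus first-match scan with a single max-tracking pass over the dict that keeps the longest matching prefix, lowering the name once instead of on every iteration.
import Mathlib
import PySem

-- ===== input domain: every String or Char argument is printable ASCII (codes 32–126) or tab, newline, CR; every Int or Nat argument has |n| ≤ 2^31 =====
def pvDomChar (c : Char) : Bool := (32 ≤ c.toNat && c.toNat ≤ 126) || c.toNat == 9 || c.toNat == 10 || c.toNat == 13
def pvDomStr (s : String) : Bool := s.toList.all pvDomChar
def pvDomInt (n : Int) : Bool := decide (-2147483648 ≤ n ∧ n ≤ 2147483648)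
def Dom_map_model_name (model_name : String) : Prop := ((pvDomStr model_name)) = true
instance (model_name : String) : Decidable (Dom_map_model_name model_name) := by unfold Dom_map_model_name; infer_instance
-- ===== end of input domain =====

-- B replaces A's sort-by-length pre-pass + first-match scan by a single longest-match-tracking fold over the dict (objective: simpler).


-- ===== PORT A =====
def pvMapping : PySem.Dict String String :=
  PySem.Dict.ofList
    [("gpt-4", "GPT-4"), ("dalle3", "GPT-4"), ("dalle-3", "GPT-4"), ("dall-e-3", "GPT-4"),
     ("gpt-3.5", "Standard"), ("websearch", "Web Search"), ("internet", "Web Search"),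
     ("gpt-4o", "GPT-4o")]

-- the for-loop with early return over the sorted keys
def pvLoopA (model_name : String) : List String → String
  | [] => "GPT-4"
  | k :: ks =>
    if PySem.Str.startswith (PySem.Str.lower model_name) k then pvMapping.getD k ""
    else pvLoopA model_name ks

def map_model_name (model_name : String) : String :=
  let sorted_keys := PySem.List.sorted pvMapping.keys (fun k => PySem.Str.len k) true
  pvLoopA model_name sorted_keys

-- ===== PORT B =====
def map_model_name_alt (model_name : String) : String :=
  let lowered := PySem.Str.lower model_name
  let st := pvMapping.items.foldl
    (fun (st : Int × String) kv =>
      if PySem.Str.len kv.1 > st.1 && PySem.Str.startswith lowered kv.1 then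
        (PySem.Str.len kv.1, kv.2)
      else st)
    (-1, "GPT-4")
  st.2

-- ===== PRECONDITION & SPEC =====
def Spec_map_model_name (model_name : String) (out : String) : Prop := out = map_model_name_alt model_name
instance (model_name : String) (out : String) : Decidable (Spec_map_model_name model_name out) := by unfold Spec_map_model_name; infer_instance

-- ===== CLAIM (what is proved, stated in full; the proofs are below) =====
def Claim_equal_map_model_name : Prop := ∀ (model_name : String), Dom_map_model_name model_name → Spec_map_model_name model_name (map_model_name model_name)

-- ===== LEMMAS AND PROOFS =====

-- A's early-return loop, abstracted over the eight startswith results (b1..b8 in A's sorted-key order)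
def pvSel (b1 b2 b3 b4 b5 b6 b7 b8 : Bool) : String :=
  if b1 then "Web Search" else if b2 then "GPT-4" else if b3 then "Web Search" else if b4 then "GPT-4" else if b5 then "Standard" else if b6 then "GPT-4" else if b7 then "GPT-4o" else if b8 then "GPT-4" else "GPT-4"

-- B's max-tracking fold, abstracted over the same eight booleans (steps in dict order)
def pvFold (b1 b2 b3 b4 b5 b6 b7 b8 : Bool) : String :=
  let st0 : Int × String := (-1, "GPT-4")
  let st1 := if 5 > st0.1 && b8 then ((5:Int), "GPT-4") else st0
  let st2 := if 6 > st1.1 && b6 then ((6:Int), "GPT-4") else st1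
  let st3 := if 7 > st2.1 && b4 then ((7:Int), "GPT-4") else st2
  let st4 := if 8 > st3.1 && b2 then ((8:Int), "GPT-4") else st3
  let st5 := if 7 > st4.1 && b5 then ((7:Int), "Standard") else st4
  let st6 := if 9 > st5.1 && b1 then ((9:Int), "Web Search") else st5
  let st7 := if 8 > st6.1 && b3 then ((8:Int), "Web Search") else st6
  let st8 := if 6 > st7.1 && b7 then ((6:Int), "GPT-4o") else st7
  st8.2

-- two keys neither of which is a prefix of the other cannot both be prefixes of the same string
theorem pv_no_both (k1 k2 s : String)
    (hk : ¬ (k1.toList <+: k2.toList) ∧ ¬ (k2.toList <+: k1.toList))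
    (h1 : PySem.Str.startswith s k1 = true) (h2 : PySem.Str.startswith s k2 = true) : False := by
  simp only [PySem.Str.startswith_eq, PySem.Chars.startswith_iff] at h1 h2
  rcases (List.prefix_or_prefix_of_prefix h1 h2) with h | h
  · exact hk.1 h
  · exact hk.2 h

theorem pv_conflict (k1 k2 s : String)
    (hk : ¬ (k1.toList <+: k2.toList) ∧ ¬ (k2.toList <+: k1.toList)) :
    (PySem.Str.startswith s k1 && PySem.Str.startswith s k2) = false := by
  cases h1 : PySem.Str.startswith s k1
  · rfl
  · cases h2 : PySem.Str.startswith s k2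
    · rfl
    · exact absurd (pv_no_both k1 k2 s hk h1 h2) id

-- "gpt-4" is a prefix of "gpt-4o"
theorem pv_sub (s : String)
    (h : PySem.Str.startswith s "gpt-4o" = true) : PySem.Str.startswith s "gpt-4" = true := by
  simp only [PySem.Str.startswith_eq, PySem.Chars.startswith_iff] at h ⊢
  exact List.IsPrefix.trans (by decide) h

-- under the realisable combinations of the eight tests, loop and fold agree
theorem pv_main (b1 b2 b3 b4 b5 b6 b7 b8 : Bool)
    (h78 : b7 = true → b8 = true)
    (h1_2 : (b1 && b2) = false)
    (h1_3 : (b1 && b3) = false)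
    (h1_4 : (b1 && b4) = false)
    (h1_5 : (b1 && b5) = false)
    (h1_6 : (b1 && b6) = false)
    (h1_7 : (b1 && b7) = false)
    (h1_8 : (b1 && b8) = false)
    (h2_3 : (b2 && b3) = false)
    (h2_4 : (b2 && b4) = false)
    (h2_5 : (b2 && b5) = false)
    (h2_6 : (b2 && b6) = false)
    (h2_7 : (b2 && b7) = false)
    (h2_8 : (b2 && b8) = false)
    (h3_4 : (b3 && b4) = false)
    (h3_5 : (b3 && b5) = false)
    (h3_6 : (b3 && b6) = false)
    (h3_7 : (b3 && b7) = false)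
    (h3_8 : (b3 && b8) = false)
    (h4_5 : (b4 && b5) = false)
    (h4_6 : (b4 && b6) = false)
    (h4_7 : (b4 && b7) = false)
    (h4_8 : (b4 && b8) = false)
    (h5_6 : (b5 && b6) = false)
    (h5_7 : (b5 && b7) = false)
    (h5_8 : (b5 && b8) = false)
    (h6_7 : (b6 && b7) = false)
    (h6_8 : (b6 && b8) = false)
    : pvSel b1 b2 b3 b4 b5 b6 b7 b8 = pvFold b1 b2 b3 b4 b5 b6 b7 b8 := by
  cases b1 <;> cases b2 <;> cases b3 <;> cases b4 <;> cases b5 <;> cases b6 <;> cases b7 <;> cases b8 <;>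
    rfl

-- A's port is the abstract loop applied to the eight tests (also evaluates the sort and the dict lookups)
set_option maxHeartbeats 4000000 in
theorem pvA_eq (s : String) :
    map_model_name s = pvSel (PySem.Str.startswith (PySem.Str.lower s) "websearch") (PySem.Str.startswith (PySem.Str.lower s) "dall-e-3") (PySem.Str.startswith (PySem.Str.lower s) "internet") (PySem.Str.startswith (PySem.Str.lower s) "dalle-3") (PySem.Str.startswith (PySem.Str.lower s) "gpt-3.5") (PySem.Str.startswith (PySem.Str.lower s) "dalle3") (PySem.Str.startswith (PySem.Str.lower s) "gpt-4o") (PySem.Str.startswith (PySem.Str.lower s) "gpt-4") := by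
  rfl

-- B's port is the abstract fold applied to the eight tests
set_option maxHeartbeats 4000000 in
theorem pvB_eq (s : String) :
    map_model_name_alt s = pvFold (PySem.Str.startswith (PySem.Str.lower s) "websearch") (PySem.Str.startswith (PySem.Str.lower s) "dall-e-3") (PySem.Str.startswith (PySem.Str.lower s) "internet") (PySem.Str.startswith (PySem.Str.lower s) "dalle-3") (PySem.Str.startswith (PySem.Str.lower s) "gpt-3.5") (PySem.Str.startswith (PySem.Str.lower s) "dalle3") (PySem.Str.startswith (PySem.Str.lower s) "gpt-4o") (PySem.Str.startswith (PySem.Str.lower s) "gpt-4") := by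
  rfl

-- ===== VERDICT (by name: the statement is the Claim_ definition above) =====
set_option maxHeartbeats 4000000 in
theorem map_model_name_spec : Claim_equal_map_model_name := by
  intro s _
  unfold Spec_map_model_name
  rw [pvA_eq, pvB_eq]
  exact pv_main _ _ _ _ _ _ _ _
    (pv_sub (PySem.Str.lower s))
    (pv_conflict "websearch" "dall-e-3" (PySem.Str.lower s) (by decide))
    (pv_conflict "websearch" "internet" (PySem.Str.lower s) (by decide))
    (pv_conflict "websearch" "dalle-3" (PySem.Str.lower s) (by decide))
    (pv_conflict "websearch" "gpt-3.5" (PySem.Str.lower s) (by decide))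
    (pv_conflict "websearch" "dalle3" (PySem.Str.lower s) (by decide))
    (pv_conflict "websearch" "gpt-4o" (PySem.Str.lower s) (by decide))
    (pv_conflict "websearch" "gpt-4" (PySem.Str.lower s) (by decide))
    (pv_conflict "dall-e-3" "internet" (PySem.Str.lower s) (by decide))
    (pv_conflict "dall-e-3" "dalle-3" (PySem.Str.lower s) (by decide))
    (pv_conflict "dall-e-3" "gpt-3.5" (PySem.Str.lower s) (by decide))
    (pv_conflict "dall-e-3" "dalle3" (PySem.Str.lower s) (by decide))
    (pv_conflict "dall-e-3" "gpt-4o" (PySem.Str.lower s) (by decide))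
    (pv_conflict "dall-e-3" "gpt-4" (PySem.Str.lower s) (by decide))
    (pv_conflict "internet" "dalle-3" (PySem.Str.lower s) (by decide))
    (pv_conflict "internet" "gpt-3.5" (PySem.Str.lower s) (by decide))
    (pv_conflict "internet" "dalle3" (PySem.Str.lower s) (by decide))
    (pv_conflict "internet" "gpt-4o" (PySem.Str.lower s) (by decide))
    (pv_conflict "internet" "gpt-4" (PySem.Str.lower s) (by decide))
    (pv_conflict "dalle-3" "gpt-3.5" (PySem.Str.lower s) (by decide))
    (pv_conflict "dalle-3" "dalle3" (PySem.Str.lower s) (by decide))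
    (pv_conflict "dalle-3" "gpt-4o" (PySem.Str.lower s) (by decide))
    (pv_conflict "dalle-3" "gpt-4" (PySem.Str.lower s) (by decide))
    (pv_conflict "gpt-3.5" "dalle3" (PySem.Str.lower s) (by decide))
    (pv_conflict "gpt-3.5" "gpt-4o" (PySem.Str.lower s) (by decide))
    (pv_conflict "gpt-3.5" "gpt-4" (PySem.Str.lower s) (by decide))
    (pv_conflict "dalle3" "gpt-4o" (PySem.Str.lower s) (by decide))
    (pv_conflict "dalle3" "gpt-4" (PySem.Str.lower s) (by decide))
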